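-- pv_equiv track=rewrite | github.com/freeorion/freeorion | check/st-tool.py | _get_brackets
-- ===== SOURCE A (Python) =====
-- from collections.abc import Iterator
--
-- def _get_brackets(text) -> Iterator[str]:
--     has = False
--     prev = ""
--     for char in text:
--         if char in "[]":
--             if has:
--                 has = False
--                 if prev == char:
--                     yield char
--             else:
--                 has = True
--                 prev = char
--         else:
--             has = False
-- ===== SOURCE B (Python) =====
-- from collections.abc import Iterator
--
-- def _get_brackets(text) -> Iterator[str]:
--     chars = list(text)
--     while chars:
--         if len(chars) >= 2 and chars[0] in "[]" and chars[1] in "[]":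
--             if chars[1] == chars[0]:
--                 yield chars[0]
--             chars = chars[2:]
--         else:
--             chars = chars[1:]
-- ===== Notes on version B (the rewrite author's own statement) =====
-- stated objective: simpler
-- what changed: Replaces A's has/prev flag state machine (one char at a time) by a two-character lookahead that consumes a whole bracket pair per step, yielding on equality.
import Mathlib
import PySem

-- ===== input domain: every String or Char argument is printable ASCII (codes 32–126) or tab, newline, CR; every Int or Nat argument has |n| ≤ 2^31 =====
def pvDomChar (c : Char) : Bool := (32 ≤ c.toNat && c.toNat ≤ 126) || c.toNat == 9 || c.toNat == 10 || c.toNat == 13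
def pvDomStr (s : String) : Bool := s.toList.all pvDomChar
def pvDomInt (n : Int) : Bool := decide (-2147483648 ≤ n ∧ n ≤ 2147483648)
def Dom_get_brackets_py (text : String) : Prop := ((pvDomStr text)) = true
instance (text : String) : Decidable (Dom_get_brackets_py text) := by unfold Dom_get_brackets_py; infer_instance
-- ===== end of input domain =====

-- B replaces A's has/prev flag state machine by a two-character lookahead that consumes a
-- bracket pair in one step (objective: simpler); equivalence is about the yielded sequence,
-- both Pythons are generators.

-- ===== PORT A =====
-- state: (yields so far, has, prev); one gbStep per character, branches as in A's loop
def gbStep (acc : List String × Bool × String) (c : Char) : List String × Bool × String :=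
  if c == '[' || c == ']' then
    if acc.2.1 then
      (acc.1 ++ (if acc.2.2 == String.ofList [c] then [String.ofList [c]] else []), false, acc.2.2)
    else
      (acc.1, true, String.ofList [c])
  else
    (acc.1, false, acc.2.2)

def get_brackets_py (text : String) : List String :=
  (text.toList.foldl gbStep ([], false, "")).1

-- ===== PORT B =====
-- Source B's while loop: if the first two chars are both brackets consume both (yield on
-- equality), otherwise drop one char
def gbPairs : List Char → List String
  | c1 :: c2 :: rest =>
    if (c1 == '[' || c1 == ']') && (c2 == '[' || c2 == ']') then
      (if c2 == c1 then [String.ofList [c1]] else []) ++ gbPairs rest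
    else
      gbPairs (c2 :: rest)
  | _ :: _ => gbPairs []
  | [] => []
termination_by l => l.length

def get_brackets_py_alt (text : String) : List String :=
  gbPairs text.toList

-- ===== PRECONDITION & SPEC =====
def Spec_get_brackets_py (text : String) (out : List String) : Prop := out = get_brackets_py_alt text
instance (text : String) (out : List String) : Decidable (Spec_get_brackets_py text out) := by unfold Spec_get_brackets_py; infer_instance

-- ===== CLAIM (what is proved, stated in full; the proofs are below) =====
def Claim_equal_get_brackets_py : Prop := ∀ (text : String), Dom_get_brackets_py text → Spec_get_brackets_py text (get_brackets_py text)

-- ===== LEMMAS AND PROOFS =====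

theorem ofList_beq_ofList (a b : Char) :
    (String.ofList [a] == String.ofList [b]) = (b == a) := by
  by_cases hab : a = b
  · subst hab; simp
  · have hne : String.ofList [a] ≠ String.ofList [b] := fun h => hab (by
      have := congrArg String.toList h; simpa using this)
    simp [hne, Ne.symm hab]

-- invariant: from a reset state (has = false, any prev) A's fold yields exactly B's pairs
theorem gb_main (cs : List Char) : ∀ (out : List String) (p : String),
    (List.foldl gbStep (out, false, p) cs).1 = out ++ gbPairs cs := by
  induction cs using gbPairs.induct with
  | case1 c1 c2 rest h ih =>
    intro out p
    have h1 : (c1 == '[' || c1 == ']') = true := by simp_all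
    have h2 : (c2 == '[' || c2 == ']') = true := by simp_all
    have hy : (String.ofList [c1] == String.ofList [c2]) = (c2 == c1) :=
      ofList_beq_ofList c1 c2
    by_cases hc : c2 = c1
    · subst hc
      simp [List.foldl, gbStep, gbPairs, h1, ih, List.append_assoc]
    · simp [List.foldl, gbStep, gbPairs, h1, h2, hy, hc, ih]
  | case2 c1 c2 rest h ih =>
    intro out p
    by_cases hb : (c1 == '[' || c1 == ']') = true
    · have hb2 : (c2 == '[' || c2 == ']') = false := by
        cases hx : (c2 == '[' || c2 == ']') <;> simp_all
      simpa [List.foldl, gbStep, gbPairs, hb, hb2, h] using ih out (String.ofList [c1])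
    · simp only [Bool.not_eq_true] at hb
      simpa [List.foldl, gbStep, gbPairs, hb, h] using ih out p
  | case3 x xs h ih =>
    intro out p
    have hx : xs = [] := by
      cases xs with
      | nil => rfl
      | cons a b => exact (h a b rfl).elim
    subst hx
    simp only [List.foldl, gbStep, gbPairs]
    split_ifs <;> simp_all
  | case4 => intro out p; simp [gbPairs]

-- ===== VERDICT (by name: the statement is the Claim_ definition above) =====
theorem get_brackets_py_spec : Claim_equal_get_brackets_py := by
  intro text _
  unfold Spec_get_brackets_py get_brackets_py get_brackets_py_alt
  simpa using gb_main text.toList [] ""
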